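-- pv_equiv track=rewrite | github.com/xchatzil/NOVA | notebooks/src/util.py | break_into_threshold_continue
-- ===== SOURCE A (Python) =====
-- def break_into_threshold_continue(number, thresholds):
--     # Result list to hold the parts
--     parts = []
--
--     # Index to track the current position in the thresholds list
--     threshold_index = 0
--
--     while number > 0:
--         # Get the current threshold, and if we've exhausted the list,
--         # keep using the last threshold.
--         if threshold_index < len(thresholds):
--             current_threshold = thresholds[threshold_index]
--         else:
--             current_threshold = thresholds[-1]
--
--         # Break the number into pieces according to the current threshold
--         if number > current_threshold:
--             parts.append(current_threshold)
--             number -= current_threshold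
--         else:
--             parts.append(number)
--             number = 0
--
--         # Move to the next threshold
--         threshold_index += 1
--
--     return parts
-- ===== SOURCE B (Python) =====
-- def break_into_threshold_continue(number, thresholds):
--     parts = []
--     for t in thresholds:
--         if number <= 0:
--             break
--         if number > t:
--             parts.append(t)
--             number -= t
--         else:
--             parts.append(number)
--             number = 0
--     if number > 0:
--         last = thresholds[-1]
--         q, rem = divmod(number, last)
--         parts.extend([last] * q)
--         if rem:
--             parts.append(rem)
--     return parts
-- ===== Notes on version B (the rewrite author's own statement) =====
-- stated objective: simpler
-- what changed: B replaces A's unbounded while-loop that repeats the last threshold one subtraction at a time by a single pass over the thresholds list followed by a closed-form divmod on the remainder.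
import Mathlib
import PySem

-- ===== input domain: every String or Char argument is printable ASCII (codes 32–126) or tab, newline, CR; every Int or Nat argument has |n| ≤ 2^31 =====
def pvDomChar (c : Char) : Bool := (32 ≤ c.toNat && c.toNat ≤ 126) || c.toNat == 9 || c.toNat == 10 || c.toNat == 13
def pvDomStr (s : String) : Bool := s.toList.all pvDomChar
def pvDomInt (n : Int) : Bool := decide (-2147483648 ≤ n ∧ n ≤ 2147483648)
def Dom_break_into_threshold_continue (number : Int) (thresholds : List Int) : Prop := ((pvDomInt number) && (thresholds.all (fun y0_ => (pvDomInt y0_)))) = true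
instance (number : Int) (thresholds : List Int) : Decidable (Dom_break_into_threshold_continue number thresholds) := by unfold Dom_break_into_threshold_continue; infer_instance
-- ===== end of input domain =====

-- B replaces A's unbounded while-loop tail (repeated subtraction of the last threshold)
-- by one pass over the thresholds followed by a closed-form divmod; equivalence is proved
-- on Pre_, exactly the inputs where A terminates without raising.


-- ===== PORT A =====
-- A's while-loop, fueled (the fuel is a termination guard only; Pre_ guarantees it suffices).
-- thresholds[-1] on an empty list raises IndexError in Python: that input is excluded by Pre_.
def pvGoA (ts : List Int) : Nat → Int → Nat → List Int → List Int
  | 0, _, _, parts => parts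
  | f + 1, n, i, parts =>
    if n > 0 then
      let t := if i < ts.length then ts.getD i 0 else (PySem.List.pyGet? ts (-1)).getD 0
      if n > t then pvGoA ts f (n - t) (i + 1) (parts ++ [t])
      else pvGoA ts f 0 (i + 1) (parts ++ [n])
    else parts

def break_into_threshold_continue (number : Int) (thresholds : List Int) : List Int :=
  pvGoA thresholds (thresholds.length + number.toNat + (thresholds.map Int.natAbs).sum + 1) number 0 []

-- ===== PORT B =====
-- phase 1: B's for-loop over thresholds (break when number ≤ 0)
def pvPhase1 (ts : List Int) (n : Int) (parts : List Int) : Int × List Int :=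
  match ts with
  | [] => (n, parts)
  | t :: rest =>
    if n ≤ 0 then (n, parts)
    else if n > t then pvPhase1 rest (n - t) (parts ++ [t])
    else pvPhase1 rest 0 (parts ++ [n])

-- phase 2: divmod(number, thresholds[-1]) on whatever remains
def break_into_threshold_continue_alt (number : Int) (thresholds : List Int) : List Int :=
  let p := pvPhase1 thresholds number []
  if p.1 > 0 then
    let last := (PySem.List.pyGet? thresholds (-1)).getD 0
    let q := PySem.Int.floordiv p.1 last
    let r := PySem.Int.mod p.1 last
    p.2 ++ List.replicate q.toNat last ++ (if r ≠ 0 then [r] else [])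
  else p.2

-- ===== PRECONDITION & SPEC =====
-- Pre_ is exactly the set of inputs on which Python A returns: with number > 0 it needs a
-- nonempty thresholds list (else thresholds[-1] raises IndexError), and either a positive last
-- threshold or the number must be used up within the first pass over thresholds (otherwise
-- A's while-loop never terminates).
def Pre_break_into_threshold_continue (number : Int) (thresholds : List Int) : Prop :=
  number ≤ 0 ∨ (thresholds ≠ [] ∧
    (0 < thresholds.getLast! ∨
     ∃ i < thresholds.length, number - ((thresholds.take i).sum) ≤ thresholds.getD i 0))
instance (number : Int) (thresholds : List Int) : Decidable (Pre_break_into_threshold_continue number thresholds) := by unfold Pre_break_into_threshold_continue; infer_instance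

def pvWitness_break_into_threshold_continue : Int × List Int := (17, [3, 5])

def Spec_break_into_threshold_continue (number : Int) (thresholds : List Int) (out : List Int) : Prop := out = break_into_threshold_continue_alt number thresholds
instance (number : Int) (thresholds : List Int) (out : List Int) : Decidable (Spec_break_into_threshold_continue number thresholds out) := by unfold Spec_break_into_threshold_continue; infer_instance

-- ===== CLAIM (what is proved, stated in full; the proofs are below) =====
def Claim_equal_break_into_threshold_continue : Prop := ∀ (number : Int) (thresholds : List Int), Dom_break_into_threshold_continue number thresholds → Pre_break_into_threshold_continue number thresholds → Spec_break_into_threshold_continue number thresholds (break_into_threshold_continue number thresholds)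

-- ===== LEMMAS AND PROOFS =====

-- B's divmod tail as a function
def pvTailB (n last : Int) : List Int :=
  List.replicate (PySem.Int.floordiv n last).toNat last ++
    (if PySem.Int.mod n last ≠ 0 then [PySem.Int.mod n last] else [])

lemma pvGet_neg_one (ts : List Int) (h : ts ≠ []) :
    (PySem.List.pyGet? ts (-1)).getD 0 = ts.getLast! := by
  rw [PySem.List.pyGet?_neg_one, List.getLast?_eq_some_getLast h]
  rw [List.getLast!_eq_getLast?_getD]
  simp [List.getLast?_eq_some_getLast h]

lemma pvTailB_step (n last : Int) (hl : 0 < last) (hn : n > last) :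
    pvTailB n last = last :: pvTailB (n - last) last := by
  unfold pvTailB
  rw [PySem.Int.floordiv_eq_ediv_of_pos hl, PySem.Int.floordiv_eq_ediv_of_pos hl,
      PySem.Int.mod_eq_emod_of_pos hl, PySem.Int.mod_eq_emod_of_pos hl]
  have hm : (n - last) % last = n % last := Int.sub_emod_right n last
  have hq : n / last = (n - last) / last + 1 := by
    have := Int.add_mul_ediv_right (n - last) 1 (by omega : last ≠ 0)
    simpa using this
  have hq' : 0 ≤ (n - last) / last := Int.ediv_nonneg (by omega) (by omega)
  rw [hm, hq]
  have : ((n - last) / last + 1).toNat = ((n - last) / last).toNat + 1 := by omega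
  rw [this, List.replicate_succ]
  simp

lemma pvTailB_base (n last : Int) (hl : 0 < last) (h0 : 0 < n) (hn : n ≤ last) :
    pvTailB n last = [n] := by
  unfold pvTailB
  rw [PySem.Int.floordiv_eq_ediv_of_pos hl, PySem.Int.mod_eq_emod_of_pos hl]
  rcases eq_or_lt_of_le hn with h | h
  · subst h
    rw [Int.ediv_self (by omega), Int.emod_self]
    simp
  · rw [Int.ediv_eq_zero_of_lt (by omega) h, Int.emod_eq_of_lt (by omega) h]
    simp
    omega

lemma pvTail_lemma (ts : List Int) (hts : ts ≠ []) (hl : 0 < ts.getLast!) :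
    ∀ (f : Nat) (n : Int) (i : Nat) (parts : List Int),
      ts.length ≤ i → 0 < n → n.toNat + 1 ≤ f →
      pvGoA ts f n i parts = parts ++ pvTailB n ts.getLast! := by
  intro f
  induction f with
  | zero => intro n i parts _ hn hf; omega
  | succ f ih =>
    intro n i parts hi hn hf
    rw [pvGoA]
    rw [if_pos hn]
    simp only [if_neg (by omega : ¬ i < ts.length), pvGet_neg_one ts hts]
    by_cases h : n > ts.getLast!
    · rw [if_pos h, ih (n - ts.getLast!) (i+1) (parts ++ [ts.getLast!]) (by omega) (by omega) (by omega)]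
      rw [pvTailB_step n ts.getLast! hl h]
      simp
    · rw [if_neg h]
      cases f with
      | zero => omega
      | succ f' =>
        rw [pvGoA, if_neg (by omega : ¬ (0:Int) > 0)]
        rw [pvTailB_base n ts.getLast! hl hn (by omega)]

lemma pvPhase1_zero (rest : List Int) (parts : List Int) :
    pvPhase1 rest 0 parts = (0, parts) := by
  cases rest <;> simp [pvPhase1]

lemma pvPhase1_nonpos (ts : List Int) (n : Int) (parts : List Int) (h : n ≤ 0) :
    pvPhase1 ts n parts = (n, parts) := by
  cases ts <;> simp [pvPhase1, h]

lemma pvBridge (ts : List Int) (hts : ts ≠ []) :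
    ∀ (rest pre : List Int) (f : Nat) (n : Int) (parts : List Int),
      ts = pre ++ rest →
      (0 < n → (0 < ts.getLast! ∨
        ∃ i < rest.length, n - ((rest.take i).sum) ≤ rest.getD i 0)) →
      rest.length + n.toNat + (rest.map Int.natAbs).sum + 1 ≤ f →
      pvGoA ts f n pre.length parts =
        (let p := pvPhase1 rest n parts;
         if p.1 > 0 then p.2 ++ pvTailB p.1 ts.getLast! else p.2) := by
  intro rest
  induction rest with
  | nil =>
    intro pre f n parts hsplit H hf
    simp only [pvPhase1]
    by_cases hn : 0 < n
    · have hl : 0 < ts.getLast! := by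
        rcases H hn with h | ⟨i, hi, _⟩
        · exact h
        · simp at hi
      rw [pvTail_lemma ts hts hl f n pre.length parts
            (by simp [hsplit]) hn (by simpa using hf)]
      simp [hn]
    · obtain ⟨f', rfl⟩ : ∃ f', f = f' + 1 := ⟨f - 1, by omega⟩
      rw [pvGoA, if_neg (by omega)]
      simp [show ¬ n > 0 by omega]
  | cons t rest' ih =>
    intro pre f n parts hsplit H hf
    obtain ⟨f', rfl⟩ : ∃ f', f = f' + 1 := ⟨f - 1, by omega⟩
    rw [pvGoA]
    by_cases hn : 0 < n
    · rw [if_pos hn]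
      have hlen : pre.length < ts.length := by simp [hsplit]
      have hget : ts.getD pre.length 0 = t := by
        rw [hsplit, List.getD_eq_getElem?_getD, List.getElem?_append_right (le_refl _)]
        simp
      simp only [if_pos hlen, hget]
      by_cases hgt : n > t
      · rw [if_pos hgt]
        have hpre' : ts = (pre ++ [t]) ++ rest' := by simp [hsplit]
        have := ih (pre ++ [t]) f' (n - t) (parts ++ [t]) hpre'
          (by
            intro hpos
            rcases H hn with h | ⟨i, hi, hle⟩
            · exact Or.inl h
            · cases i with
              | zero => simp at hle; omega
              | succ i' =>
                right
                exact ⟨i', by simpa using hi, by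
                  simp [List.take_succ_cons] at hle ⊢
                  omega⟩)
          (by
            simp at hf ⊢
            have : (n - t).toNat ≤ n.toNat + t.natAbs := by omega
            omega)
        rw [show (pre ++ [t]).length = pre.length + 1 by simp] at this
        rw [this]
        simp only [pvPhase1, if_neg (by omega : ¬ n ≤ 0), if_pos hgt]
      · rw [if_neg hgt]
        obtain ⟨f'', rfl⟩ : ∃ f'', f' = f'' + 1 := ⟨f' - 1, by omega⟩
        rw [pvGoA, if_neg (by omega : ¬ (0:Int) > 0)]
        simp only [pvPhase1, if_neg (by omega : ¬ n ≤ 0), if_neg hgt, pvPhase1_zero]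
        simp
    · rw [if_neg (by omega)]
      simp only [pvPhase1, if_pos (by omega : n ≤ 0)]
      simp [show ¬ n > 0 by omega]

-- ===== VERDICT (by name: the statement is the Claim_ definition above) =====
theorem break_into_threshold_continue_spec : Claim_equal_break_into_threshold_continue := by
  intro n ts _ hpre
  unfold Spec_break_into_threshold_continue
  unfold break_into_threshold_continue break_into_threshold_continue_alt
  by_cases hn : 0 < n
  · have hts : ts ≠ [] := by
      rcases hpre with h | ⟨h, _⟩
      · omega
      · exact h
    have hcond : 0 < n → (0 < ts.getLast! ∨
        ∃ i < ts.length, n - ((ts.take i).sum) ≤ ts.getD i 0) := by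
      intro _
      rcases hpre with h | ⟨_, h⟩
      · omega
      · exact h
    have hb := pvBridge ts hts ts [] (ts.length + n.toNat + (ts.map Int.natAbs).sum + 1)
      n [] (by simp) hcond (le_refl _)
    simp only [List.length_nil] at hb
    rw [hb, pvGet_neg_one ts hts]
    simp only [pvTailB]
    split
    · simp
    · rfl
  · obtain ⟨f', hf⟩ : ∃ f', ts.length + n.toNat + (ts.map Int.natAbs).sum + 1 = f' + 1 :=
      ⟨_, rfl⟩
    rw [hf, pvGoA, if_neg (by omega)]
    rw [pvPhase1_nonpos ts n [] (by omega)]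
    simp [show ¬ n > 0 by omega]
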